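-- pv_equiv track=rewrite | github.com/2018hsridhar/LEETCODE_REPO_2 | leetcode_3730.py | maxCaloriesBurnt
-- ===== SOURCE A (Python) =====
-- from typing import List
--
-- def maxCaloriesBurnt(heights: List[int]) -> int:
--     heights.sort()
--     myCaloriesBurnt = prev = cur = 0
--     jumpUp = True
--     leftPtr = 0
--     rightPtr = len(heights) - 1
--     while leftPtr <= rightPtr:
--         cur = heights[rightPtr] if jumpUp else heights[leftPtr]
--         if(jumpUp):
--             rightPtr -= 1
--         else:
--             cur = heights[leftPtr]
--             leftPtr += 1
--         diff = cur - prev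
--         delta = diff * diff
--         myCaloriesBurnt += delta
--         prev = cur
--         jumpUp = not jumpUp
--     return (int)(myCaloriesBurnt)
-- ===== SOURCE B (Python) =====
-- from typing import List
--
-- def maxCaloriesBurnt(heights: List[int]) -> int:
--     # Algebraic closed form: expanding the squared differences of the
--     # alternating max/min jump sequence, every term collapses to
--     #   2*sum(h^2) - sum(s[i]*s[n-1-i]) - sum(s[i]*s[n-2-i])
--     # over the sorted list s, so no jump order needs to be constructed.
--     heights.sort()
--     r = heights[::-1]
--     return (2 * sum(h * h for h in heights)
--             - sum(a * b for a, b in zip(heights, r))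
--             - sum(a * b for a, b in zip(heights, r[1:])))
-- ===== Notes on version B (the rewrite author's own statement) =====
-- stated objective: alternative
-- what changed: Replaces A's two-pointer/jumpUp traversal of the alternating max/min jump order with an algebraic closed form: expanding all squared differences collapses the total to 2*sum(h^2) minus the product sums of the sorted list zipped with its reverse and with the reverse shifted by one, so no jump ordering is ever constructed.
import Mathlib
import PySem

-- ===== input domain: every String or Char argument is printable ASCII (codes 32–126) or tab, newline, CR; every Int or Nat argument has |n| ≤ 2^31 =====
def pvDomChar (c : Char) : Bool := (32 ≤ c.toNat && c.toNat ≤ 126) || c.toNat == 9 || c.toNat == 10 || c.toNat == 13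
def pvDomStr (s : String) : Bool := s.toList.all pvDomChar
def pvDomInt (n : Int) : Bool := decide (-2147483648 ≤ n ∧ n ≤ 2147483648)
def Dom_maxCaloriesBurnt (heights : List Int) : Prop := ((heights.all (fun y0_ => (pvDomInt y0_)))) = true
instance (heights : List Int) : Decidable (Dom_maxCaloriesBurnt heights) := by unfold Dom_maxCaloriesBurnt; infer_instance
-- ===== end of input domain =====

-- B replaces A's two-pointer jump loop with an algebraic closed form
-- (2*Σh² minus products of the sorted list zipped with its reverse and the
-- reverse shifted by one), eliminating the jump ordering altogether
-- (objective: alternative algorithm, same cost). Both Pythons sort the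
-- argument in place; the equivalence proved here is about the return value.

-- ===== PORT A =====
-- the while loop of A; state = (myCaloriesBurnt, prev, jumpUp, leftPtr, rightPtr).
-- heights[rightPtr] / heights[leftPtr]: in every run A makes, 0 ≤ leftPtr ≤ rightPtr < len,
-- so pyGet? is always `some`; `.getD 0` only fills the unreachable none case.
def maxCalLoopA (h : List Int) (myCaloriesBurnt prev : Int) (jumpUp : Bool)
    (leftPtr rightPtr : Int) : Int :=
  if _hlr : leftPtr ≤ rightPtr then
    let cur := (PySem.List.pyGet? h (if jumpUp then rightPtr else leftPtr)).getD 0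
    if jumpUp then
      let rightPtr' := rightPtr - 1
      let diff := cur - prev
      let delta := diff * diff
      maxCalLoopA h (myCaloriesBurnt + delta) cur (!jumpUp) leftPtr rightPtr'
    else
      let cur := (PySem.List.pyGet? h leftPtr).getD 0
      let leftPtr' := leftPtr + 1
      let diff := cur - prev
      let delta := diff * diff
      maxCalLoopA h (myCaloriesBurnt + delta) cur (!jumpUp) leftPtr' rightPtr
  else myCaloriesBurnt
termination_by (rightPtr + 1 - leftPtr).toNat
decreasing_by all_goals omega

def maxCaloriesBurnt (heights : List Int) : Int :=
  let heights := PySem.List.sorted heights (fun x => x) false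
  maxCalLoopA heights 0 0 true 0 ((heights.length : Int) - 1)

-- ===== PORT B =====
def maxCaloriesBurnt_alt (heights : List Int) : Int :=
  let heights := PySem.List.sorted heights (fun x => x) false
  let r := (PySem.List.slice? heights none none (-1)).getD []   -- heights[::-1]; step ≠ 0, never none
  2 * (heights.map (fun h => h * h)).sum
    - ((heights.zip r).map (fun p => p.1 * p.2)).sum
    - ((heights.zip (PySem.List.slice r (some 1) none)).map (fun p => p.1 * p.2)).sum

-- ===== PRECONDITION & SPEC =====
def Spec_maxCaloriesBurnt (heights : List Int) (out : Int) : Prop := out = maxCaloriesBurnt_alt heights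
instance (heights : List Int) (out : Int) : Decidable (Spec_maxCaloriesBurnt heights out) := by unfold Spec_maxCaloriesBurnt; infer_instance

-- ===== CLAIM (what is proved, stated in full; the proofs are below) =====
def Claim_equal_maxCaloriesBurnt : Prop := ∀ (heights : List Int), Dom_maxCaloriesBurnt heights → Spec_maxCaloriesBurnt heights (maxCaloriesBurnt heights)

-- ===== LEMMAS AND PROOFS =====

-- the alternating-ends ("zigzag") ordering A's loop visits, and its running sum
def zigzag : List Int → List Int
  | [] => []
  | [x] => [x]
  | x :: y :: xs => (y :: xs).getLast (by simp) :: x :: zigzag ((y :: xs).dropLast)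
termination_by s => s.length
decreasing_by simp [List.length_dropLast]

def sqSum : Int → List Int → Int
  | _, [] => 0
  | prev, x :: xs => (x - prev) * (x - prev) + sqSum x xs

-- sum of pairwise products of a zip (the form B's two zip passes compute)
def zp (a b : List Int) : Int := ((a.zip b).map (fun p => p.1 * p.2)).sum

theorem zigzag_concat (x y : Int) (m : List Int) :
    zigzag (x :: (m ++ [y])) = y :: x :: zigzag m := by
  obtain ⟨c, cs, hc⟩ : ∃ c cs, m ++ [y] = c :: cs := by cases m <;> simp
  have hlast : (c :: cs).getLast (by simp) = y := by
    have h1 : (c :: cs).getLast? = some y := by rw [← hc]; simp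
    simpa [List.getLast?_eq_some_getLast] using h1
  have hdrop : (c :: cs).dropLast = m := by rw [← hc]; simp
  rw [hc, zigzag, hlast, hdrop]

theorem zigzag_head (h : Int) (t : List Int) :
    ∃ tl, zigzag (h :: t) = ((h :: t).getLast?.getD 0) :: tl := by
  cases t with
  | nil => exact ⟨[], by simp [zigzag]⟩
  | cons a as =>
    refine ⟨h :: zigzag ((a :: as).dropLast), ?_⟩
    rw [zigzag]
    congr 1

theorem sqSum_prev (p h : Int) (t : List Int) :
    sqSum p (h :: t) = sqSum 0 (h :: t) + p * p - 2 * p * h := by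
  simp only [sqSum]; ring

theorem zp_snoc (x : Int) : ∀ (a b : List Int), b.length + 1 = a.length →
    zp a (b ++ [x]) = zp a b + (a.getLast?.getD 0) * x := by
  intro a
  induction a with
  | nil => intro b hb; simp at hb
  | cons a0 rest ih =>
    intro b hb
    cases rest with
    | nil =>
      have : b = [] := by cases b <;> simp_all
      subst this; simp [zp]
    | cons a1 r2 =>
      cases b with
      | nil => simp at hb
      | cons b0 bs =>
        have h1 := ih bs (by simpa using hb)
        simp only [zp, List.cons_append, List.zip_cons_cons, List.map_cons,
          List.sum_cons] at h1 ⊢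
        have hl : (a0 :: a1 :: r2).getLast?.getD 0 = (a1 :: r2).getLast?.getD 0 := by
          rw [List.getLast?_cons_cons]
        rw [hl]
        omega

theorem zp_split (a b c d : List Int) (h : a.length = c.length) :
    zp (a ++ b) (c ++ d) = zp a c + zp b d := by
  simp [zp, List.zip_append h]

-- the algebraic identity: the zigzag squared-difference sum equals
-- 2·Σh² − Σ s·rev(s) − Σ s·(rev(s) shifted by one)
theorem zigzag_closed_form : ∀ (n : Nat) (s : List Int), s.length = n →
    sqSum 0 (zigzag s) =
      2 * (s.map (fun h => h * h)).sum - zp s s.reverse - zp s (s.reverse.drop 1) := by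
  intro n
  induction n using Nat.strong_induction_on with
  | _ n ih =>
    intro s hn
    rcases s with _ | ⟨x, t⟩
    · simp [zigzag, sqSum, zp]
    rcases List.eq_nil_or_concat t with h | ⟨m, y, hm⟩
    · subst h; simp [zigzag, sqSum, zp]; ring
    rw [List.concat_eq_append] at hm
    subst hm
    rcases m with _ | ⟨h0, t0⟩
    · -- s = [x, y]
      simp [zigzag, sqSum, zp]; ring
    set m : List Int := h0 :: t0 with hmdef
    have hmne : m ≠ [] := by simp [hmdef]
    set g : Int := m.getLast?.getD 0 with hg
    -- left side: peel y, x, then shift sqSum's prev from x to 0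
    obtain ⟨tl, htl⟩ := zigzag_head h0 t0
    have hL : sqSum 0 (zigzag (x :: (m ++ [y]))) =
        (y - 0) * (y - 0) + (x - y) * (x - y) + sqSum 0 (zigzag m) + x * x - 2 * x * g := by
      rw [zigzag_concat]
      simp only [sqSum]
      rw [← hmdef] at htl
      rw [htl, sqSum_prev, ← htl]
      ring
    rw [hL, ih m.length (by simp [hmdef] at hn ⊢; omega) m rfl]
    -- reverse decompositions
    obtain ⟨c, cs, hrev⟩ : ∃ c cs, m.reverse = c :: cs := by
      cases hmr : m.reverse with
      | nil => exact absurd (List.reverse_eq_nil_iff.mp hmr) hmne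
      | cons c cs => exact ⟨c, cs, rfl⟩
    have hc : c = g := by
      have : m.reverse.head? = m.getLast? := List.head?_reverse
      rw [hrev] at this
      cases hgl : m.getLast? with
      | none => rw [hgl] at this; simp at this
      | some v => rw [hgl] at this; simp at this; simp [hg, hgl, this]
    have hsrev : (x :: (m ++ [y])).reverse = (y :: m.reverse) ++ [x] := by simp
    -- zp s s.reverse = 2*x*y + zp m m.reverse
    have hzp1 : zp (x :: (m ++ [y])) ((x :: (m ++ [y])).reverse)
        = 2 * (x * y) + zp m m.reverse := by
      rw [hsrev]
      have : zp (x :: (m ++ [y])) ((y :: m.reverse) ++ [x])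
          = zp ((x :: m) ++ [y]) ((y :: m.reverse) ++ [x]) := by simp
      rw [this, zp_split (x :: m) [y] (y :: m.reverse) [x] (by simp)]
      simp only [zp, List.zip_cons_cons, List.map_cons, List.sum_cons]
      simp; ring
    -- zp s (s.reverse.drop 1) = 2*x*g + zp m (m.reverse.drop 1)
    have hzp2 : zp (x :: (m ++ [y])) (((x :: (m ++ [y])).reverse).drop 1)
        = 2 * (x * g) + zp m (m.reverse.drop 1) := by
      rw [hsrev]
      have hdrop : ((y :: m.reverse) ++ [x]).drop 1 = m.reverse ++ [x] := by simp
      rw [hdrop]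
      have hsplit : zp (x :: (m ++ [y])) (m.reverse ++ [x])
          = zp ((x :: m) ++ [y]) ((m.reverse ++ [x]) ++ []) := by simp
      rw [hsplit, zp_split (x :: m) [y] (m.reverse ++ [x]) [] (by simp)]
      have hzs : zp (x :: m) (m.reverse ++ [x])
          = zp (x :: m) m.reverse + g * x := by
        rw [zp_snoc x (x :: m) m.reverse (by simp)]
        have hgl : (x :: m).getLast?.getD 0 = g := by
          rw [hg, hmdef, List.getLast?_cons_cons]
        rw [hgl]
      rw [hzs]
      have hzxm : zp (x :: m) m.reverse = x * g + zp m (m.reverse.drop 1) := by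
        rw [hrev]
        simp only [zp, List.zip_cons_cons, List.map_cons, List.sum_cons, hc]
        simp
      rw [hzxm]
      simp [zp]; ring
    rw [hzp1, hzp2]
    simp only [List.map_append, List.map_cons, List.sum_append, List.sum_cons,
      List.map_nil, List.sum_nil]
    ring

theorem seg_decomp (h : List Int) (a k : Nat) (hlen : a + k + 2 ≤ h.length) :
    (h.drop a).take (k + 2) =
      h[a]'(by omega) :: (((h.drop (a+1)).take k) ++ [h[a+k+1]'(by omega)]) := by
  have ha : a < h.length := by omega
  rw [List.drop_eq_getElem_cons ha, List.take_succ_cons]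
  congr 1
  rw [List.take_add_one]
  congr 1
  have h2 : (h.drop (a+1))[k]? = some (h[a + 1 + k]'(by omega)) := by
    rw [List.getElem?_drop, List.getElem?_eq_getElem (by omega)]
  rw [h2]
  simp only [Option.toList_some]
  congr 1
  exact getElem_congr rfl (by omega) (by omega)

theorem pyGetD_int (h : List Int) (i : Int) (h0 : 0 ≤ i) (hi : i < (h.length : Int)) :
    (PySem.List.pyGet? h i).getD 0 = h[i.toNat]'(by omega) := by
  rw [PySem.List.pyGet?_of_nonneg h h0, List.getElem?_eq_getElem (by omega)]
  rfl

theorem loopA_eq (h : List Int) : ∀ (n : Nat) (l r acc prev : Int),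
    0 ≤ l → r < (h.length : Int) → (r + 1 - l).toNat = n →
    maxCalLoopA h acc prev true l r = acc + sqSum prev (zigzag ((h.drop l.toNat).take n)) := by
  intro n
  induction n using Nat.strong_induction_on with
  | _ n ih =>
    intro l r acc prev hl hr hn
    by_cases hlr : l ≤ r
    case neg =>
      rw [maxCalLoopA, dif_neg hlr]
      have : n = 0 := by omega
      subst this
      simp [zigzag, sqSum]
    case pos =>
      rw [maxCalLoopA, dif_pos hlr]
      simp only [if_true, Bool.not_true]
      rw [pyGetD_int h r (by omega) hr]
      by_cases hlr2 : l ≤ r - 1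
      case neg =>
        -- l = r : one more iteration then stop
        rw [maxCalLoopA, dif_neg hlr2]
        have hrl : r = l := by omega
        have hn1 : n = 1 := by omega
        subst hn1
        have hl' : l.toNat < h.length := by omega
        rw [List.drop_eq_getElem_cons hl', List.take_succ_cons, List.take_zero]
        have heq : h[r.toNat]'(by omega) = h[l.toNat]'(by omega) :=
          getElem_congr rfl (by omega) (by omega)
        rw [heq]
        simp [zigzag, sqSum]
      case pos =>
        rw [maxCalLoopA, dif_pos hlr2]
        simp only [if_false, Bool.not_false, Bool.false_eq_true]
        rw [pyGetD_int h l (by omega) (by omega)]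
        rw [ih (n - 2) (by omega) (l + 1) (r - 1) _ _ (by omega) (by omega) (by omega)]
        have hseg := seg_decomp h l.toNat (n - 2) (by omega)
        have hn2 : n - 2 + 2 = n := by omega
        rw [hn2] at hseg
        rw [hseg, zigzag_concat]
        have h1 : h[l.toNat + (n-2) + 1]'(by omega) = h[r.toNat]'(by omega) :=
          getElem_congr rfl (by omega) (by omega)
        have h2 : ((l + 1).toNat : Nat) = l.toNat + 1 := by omega
        rw [h1, h2]
        simp only [sqSum]
        ring

-- ===== VERDICT (by name: the statement is the Claim_ definition above) =====
theorem maxCaloriesBurnt_spec : Claim_equal_maxCaloriesBurnt := by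
  intro heights _
  unfold Spec_maxCaloriesBurnt maxCaloriesBurnt maxCaloriesBurnt_alt
  set s := PySem.List.sorted heights (fun x => x) false with hs
  simp only [PySem.List.slice?_none_none_neg_one, Option.getD_some,
    PySem.List.slice_from_one]
  rw [loopA_eq s s.length 0 ((s.length : Int) - 1) 0 0 (by omega) (by omega) (by omega)]
  have hseg : List.take s.length (List.drop (Int.toNat 0) s) = s := by simp
  rw [hseg, zigzag_closed_form s.length s rfl]
  simp [zp, List.drop_one]
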